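-- pv_equiv track=rewrite | github.com/BearHunter49/Algorithm | Programmers/Level2/level2_조이스틱.py | find_next_position
-- ===== SOURCE A (Python) =====
-- def find_next_position(name, current_position, checked):
--     length = len(checked)
--     is_finished = True
--
--     # 작명 시작일 때
--     if not checked[current_position]:
--         return current_position, 0
--
--     # 오른쪽으로 찾기
--     right_distance = 0
--     right_search = 0
--     for i in range(1, length):
--         right_search = (current_position + i) % length
--         right_distance = i
--         if not checked[right_search] and name[right_search] != "A":  # 체크 안한 곳 (A도 아님)
--             is_finished = False
--             break
--
--     # 왼쪽으로 찾기
--     left_distance = 0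
--     left_search = 0
--     for i in range(1, length):
--         left_search = (current_position - i) % length
--         left_distance = i
--         if not checked[left_search] and name[left_search] != "A":  # 체크 안한 곳 (A도 아님)
--             is_finished = False
--             break
--
--     if is_finished:  # 끝났으면
--         return -1, 0
--
--     # 더 가까운 쪽 선택
--     if right_distance > left_distance:
--         return left_search, left_distance
--     else:
--         return right_search, right_distance
-- ===== SOURCE B (Python) =====
-- def find_next_position(name, current_position, checked):
--     length = len(checked)
--     if not checked[current_position]:
--         return current_position, 0
--     for d in range(1, length):
--         r = (current_position + d) % length
--         if not checked[r] and name[r] != "A":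
--             return r, d
--         l = (current_position - d) % length
--         if not checked[l] and name[l] != "A":
--             return l, d
--     return -1, 0
-- ===== Notes on version B (the rewrite author's own statement) =====
-- stated objective: simpler
-- what changed: A runs two separate full scans (right, then left) each carrying leftover search/distance state, then compares the two distances; B is one loop over the distance d that returns at the first valid candidate, testing the right candidate before the left to keep A's tie-break.
import Mathlib
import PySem

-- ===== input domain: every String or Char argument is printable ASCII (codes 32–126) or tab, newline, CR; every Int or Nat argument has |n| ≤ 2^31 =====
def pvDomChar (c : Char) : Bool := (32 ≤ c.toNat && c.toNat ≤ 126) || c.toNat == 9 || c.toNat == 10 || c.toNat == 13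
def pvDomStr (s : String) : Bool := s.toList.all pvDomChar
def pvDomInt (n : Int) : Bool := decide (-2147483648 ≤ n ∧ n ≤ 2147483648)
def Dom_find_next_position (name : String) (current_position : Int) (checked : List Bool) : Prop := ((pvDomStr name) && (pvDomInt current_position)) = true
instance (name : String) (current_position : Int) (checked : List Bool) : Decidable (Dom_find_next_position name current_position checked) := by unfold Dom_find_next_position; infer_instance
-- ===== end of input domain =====

-- B replaces A's two full scans (right, then left, then a distance comparison) by ONE loop over the
-- distance that returns at the first valid candidate, testing right before left; objective: simpler.

-- ===== PORT A =====
-- the loop condition 'not checked[p] and name[p] != "A"' shared verbatim by both Pythons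
-- (for the positions the scans visit this is exact; name[p] with p ≥ len(name) raises in Python,
-- and Pre_ below excludes exactly the inputs on which a scan reaches such a read)
def pvTest (name : String) (checked : List Bool) (p : Int) : Bool :=
  (PySem.List.pyGet? checked p == some false) && !(PySem.Str.pyGet? name p == some 'A')

-- 'for i in range(1, length): search = pos(i); distance = i; if test(search): break'
-- returning the leftover (search, distance) and whether the loop broke
def pvScanA (t : Int → Bool) (pos : Int → Int) : List Int → Int → Int → Int × Int × Bool
  | [], s, d => (s, d, false)
  | i :: rest, _, _ =>
    if t (pos i) then (pos i, i, true) else pvScanA t pos rest (pos i) i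

def find_next_position (name : String) (current_position : Int) (checked : List Bool) : Int × Int :=
  let length : Int := checked.length
  match PySem.List.pyGet? checked current_position with
  | none => (0, 0)  -- IndexError in Python; excluded by Pre_
  | some c =>
    if !c then (current_position, 0)
    else
      let r := pvScanA (pvTest name checked) (fun i => PySem.Int.mod (current_position + i) length)
                 (PySem.List.pyRange 1 length 1) 0 0
      let lf := pvScanA (pvTest name checked) (fun i => PySem.Int.mod (current_position - i) length)
                 (PySem.List.pyRange 1 length 1) 0 0
      let isFinished := !r.2.2 && !lf.2.2
      if isFinished then (-1, 0)
      else if r.2.1 > lf.2.1 then (lf.1, lf.2.1) else (r.1, r.2.1)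

-- ===== PORT B =====
-- 'for d in range(1, length): test right candidate, then left candidate; return at the first hit'
def pvScanB (name : String) (checked : List Bool) (cur n : Int) : List Int → Int × Int
  | [] => (-1, 0)
  | d :: rest =>
    let r := PySem.Int.mod (cur + d) n
    if pvTest name checked r then (r, d)
    else
      let lft := PySem.Int.mod (cur - d) n
      if pvTest name checked lft then (lft, d)
      else pvScanB name checked cur n rest

def find_next_position_alt (name : String) (current_position : Int) (checked : List Bool) : Int × Int :=
  let n : Int := checked.length
  match PySem.List.pyGet? checked current_position with
  | none => (0, 0)  -- IndexError in Python; excluded by Pre_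
  | some c =>
    if !c then (current_position, 0)
    else pvScanB name checked current_position n (PySem.List.pyRange 1 n 1)

-- ===== PRECONDITION & SPEC =====
-- 'the first position where a scan over `pos` would stop (unchecked, and not an in-range letter A)
-- lies inside name' — i.e. that scan of A performs no out-of-range read of name
def pvScanSafe (name : String) (checked : List Bool) (pos : Int → Int) : Bool :=
  (PySem.List.pyRange 1 (checked.length : Int) 1).all fun i =>
    !((pvTest name checked (pos i)) &&
      (PySem.List.pyRange 1 (checked.length : Int) 1).all fun j =>
        decide (i ≤ j) || !pvTest name checked (pos j))
    || (PySem.Str.pyGet? name (pos i)).isSome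

-- Pre_ excludes exactly the inputs on which Python A raises: current_position out of range for
-- checked (IndexError), and inputs where a scan's first stopping probe reads name past its end
-- (IndexError on name[p]); on every other input A returns and B matches it.
def Pre_find_next_position (name : String) (current_position : Int) (checked : List Bool) : Prop :=
  PySem.Raise.InRange checked.length current_position ∧
    (PySem.List.pyGet? checked current_position = some false ∨
     (pvScanSafe name checked (fun i => PySem.Int.mod (current_position + i) checked.length) &&
      pvScanSafe name checked (fun i => PySem.Int.mod (current_position - i) checked.length)) = true)
instance (name : String) (current_position : Int) (checked : List Bool) : Decidable (Pre_find_next_position name current_position checked) := by unfold Pre_find_next_position; infer_instance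
def pvWitness_find_next_position : String × Int × List Bool := ("BC", 1, [true, false])

def Spec_find_next_position (name : String) (current_position : Int) (checked : List Bool) (out : Int × Int) : Prop := out = find_next_position_alt name current_position checked
instance (name : String) (current_position : Int) (checked : List Bool) (out : Int × Int) : Decidable (Spec_find_next_position name current_position checked out) := by unfold Spec_find_next_position; infer_instance

-- ===== CLAIM (what is proved, stated in full; the proofs are below) =====
def Claim_equal_find_next_position : Prop := ∀ (name : String) (current_position : Int) (checked : List Bool), Dom_find_next_position name current_position checked → Pre_find_next_position name current_position checked → Spec_find_next_position name current_position checked (find_next_position name current_position checked)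

-- ===== LEMMAS AND PROOFS =====

lemma pvScanA_found (t : Int → Bool) (pos : Int → Int) :
    ∀ (l : List Int) (s d i₀ : Int), l.find? (fun i => t (pos i)) = some i₀ →
      pvScanA t pos l s d = (pos i₀, i₀, true) := by
  intro l
  induction l with
  | nil => intro s d i₀ h; simp at h
  | cons i rest ih =>
    intro s d i₀ h
    by_cases hi : t (pos i)
    · simp [List.find?_cons, hi] at h
      simp [pvScanA, hi, ← h]
    · simp [List.find?_cons, hi] at h
      simp [pvScanA, hi, ih _ _ _ h]

lemma pvScanA_not_found (t : Int → Bool) (pos : Int → Int) :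
    ∀ (l : List Int) (s d : Int), l.find? (fun i => t (pos i)) = none →
      (pvScanA t pos l s d).2.2 = false := by
  intro l
  induction l with
  | nil => intro s d _; simp [pvScanA]
  | cons i rest ih =>
    intro s d h
    have hall := List.find?_eq_none.mp h
    have hi : ¬ t (pos i) = true := by simpa using hall i (List.mem_cons_self)
    have hrest : rest.find? (fun i => t (pos i)) = none :=
      List.find?_eq_none.mpr (fun x hx => hall x (List.mem_cons_of_mem _ hx))
    simp [pvScanA, hi, ih _ _ hrest]

lemma pvScanB_found (name : String) (checked : List Bool) (cur n : Int) :
    ∀ (l : List Int) (m : Int),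
      l.find? (fun d => pvTest name checked (PySem.Int.mod (cur + d) n) ||
                        pvTest name checked (PySem.Int.mod (cur - d) n)) = some m →
      pvScanB name checked cur n l =
        (if pvTest name checked (PySem.Int.mod (cur + m) n) then PySem.Int.mod (cur + m) n
         else PySem.Int.mod (cur - m) n, m) := by
  intro l
  induction l with
  | nil => intro m h; simp at h
  | cons d rest ih =>
    intro m h
    by_cases hr : pvTest name checked (PySem.Int.mod (cur + d) n)
    · simp [List.find?_cons, hr] at h
      simp [pvScanB, hr, ← h]
    · by_cases hl : pvTest name checked (PySem.Int.mod (cur - d) n)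
      · simp [List.find?_cons, hr, hl] at h
        simp [pvScanB, hr, hl, ← h]
      · simp [List.find?_cons, hr, hl] at h
        simp [pvScanB, hr, hl, ih _ h]

lemma pvScanB_not_found (name : String) (checked : List Bool) (cur n : Int) :
    ∀ (l : List Int),
      l.find? (fun d => pvTest name checked (PySem.Int.mod (cur + d) n) ||
                        pvTest name checked (PySem.Int.mod (cur - d) n)) = none →
      pvScanB name checked cur n l = (-1, 0) := by
  intro l
  induction l with
  | nil => intro _; simp [pvScanB]
  | cons d rest ih =>
    intro h
    have hall := List.find?_eq_none.mp h
    have hd : ¬ (pvTest name checked (PySem.Int.mod (cur + d) n) ||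
                 pvTest name checked (PySem.Int.mod (cur - d) n)) = true := by
      simpa using hall d (List.mem_cons_self)
    have hr : ¬ pvTest name checked (PySem.Int.mod (cur + d) n) = true := by
      intro h'; exact hd (by simp [h'])
    have hl : ¬ pvTest name checked (PySem.Int.mod (cur - d) n) = true := by
      intro h'; exact hd (by simp [h'])
    have hrest : rest.find? _ = none :=
      List.find?_eq_none.mpr (fun x hx => hall x (List.mem_cons_of_mem _ hx))
    simp [pvScanB, hr, hl, ih hrest]

-- on a strictly increasing list find? returns the least satisfying element
lemma pvFind?_min {p : Int → Bool} :
    ∀ {l : List Int}, l.Pairwise (· < ·) → ∀ {a : Int}, l.find? p = some a →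
      ∀ x ∈ l, p x = true → a ≤ x := by
  intro l
  induction l with
  | nil => intro _ a h; simp at h
  | cons b rest ih =>
    intro hpw a h x hx hpx
    rw [List.pairwise_cons] at hpw
    by_cases hb : p b
    · simp [List.find?_cons, hb] at h
      rcases List.mem_cons.mp hx with rfl | hx'
      · omega
      · have := hpw.1 x hx'; omega
    · simp [List.find?_cons, hb] at h
      rcases List.mem_cons.mp hx with rfl | hx'
      · simp [hpx] at hb
      · exact ih hpw.2 h x hx' hpx

-- (cur - d) and (cur + (n - d)) name the same position modulo n
lemma pvModShiftL (cur n d : Int) (hn : 0 < n) :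
    PySem.Int.mod (cur + (n - d)) n = PySem.Int.mod (cur - d) n := by
  rw [PySem.Int.mod_eq_emod_of_pos hn, PySem.Int.mod_eq_emod_of_pos hn]
  have : cur + (n - d) = (cur - d) + n := by ring
  rw [this, Int.add_emod_right]

lemma pvModShiftR (cur n d : Int) (hn : 0 < n) :
    PySem.Int.mod (cur - (n - d)) n = PySem.Int.mod (cur + d) n := by
  rw [PySem.Int.mod_eq_emod_of_pos hn, PySem.Int.mod_eq_emod_of_pos hn]
  have : cur - (n - d) = (cur + d) - n := by ring
  rw [this, Int.sub_emod_right]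

theorem find_next_position_spec : Claim_equal_find_next_position := by
  unfold Claim_equal_find_next_position
  intro name cur checked _ _
  unfold Spec_find_next_position
  unfold find_next_position find_next_position_alt
  cases hg : PySem.List.pyGet? checked cur with
  | none => rfl
  | some c =>
    cases c with
    | false => rfl
    | true =>
      simp only [Bool.not_true, Bool.false_eq_true, if_false]
      -- notation
      set n : Int := (checked.length : Int) with hn_def
      have hne : checked ≠ [] := by
        intro h; subst h; simp [PySem.List.pyGet?, PySem.List.pyIdx?] at hg
      have hn : 0 < n := by
        have : 0 < checked.length := List.length_pos_iff.mpr hne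
        omega
      set l : List Int := PySem.List.pyRange 1 n 1 with hl_def
      have hpw : l.Pairwise (· < ·) := PySem.List.pairwise_lt_pyRange_one 1 n
      set R : Int → Bool := fun d => pvTest name checked (PySem.Int.mod (cur + d) n) with hR_def
      set L : Int → Bool := fun d => pvTest name checked (PySem.Int.mod (cur - d) n) with hL_def
      -- symmetry: a hit on one side gives a hit on the other
      have symLR : ∀ d ∈ l, L d = true → (n - d) ∈ l ∧ R (n - d) = true := by
        intro d hd hLd
        have hmem := (PySem.List.mem_pyRange_one).mp (hl_def ▸ hd)
        refine ⟨?_, ?_⟩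
        · rw [hl_def]; exact (PySem.List.mem_pyRange_one).mpr (by omega)
        · rw [hR_def]; simp only []
          rw [pvModShiftL cur n d hn]; exact hLd
      have symRL : ∀ d ∈ l, R d = true → (n - d) ∈ l ∧ L (n - d) = true := by
        intro d hd hRd
        have hmem := (PySem.List.mem_pyRange_one).mp (hl_def ▸ hd)
        refine ⟨?_, ?_⟩
        · rw [hl_def]; exact (PySem.List.mem_pyRange_one).mpr (by omega)
        · rw [hL_def]; simp only []
          rw [pvModShiftR cur n d hn]; exact hRd
      cases hfb : l.find? (fun d => R d || L d) with
      | none =>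
        have hall := List.find?_eq_none.mp hfb
        have hfr : l.find? R = none := List.find?_eq_none.mpr (by
          intro x hx hRx
          exact absurd (by simp [hRx]) (hall x hx))
        have hfl : l.find? L = none := List.find?_eq_none.mpr (by
          intro x hx hLx
          exact absurd (by simp [hLx]) (hall x hx))
        rw [pvScanB_not_found name checked cur n l hfb]
        have hr2 := pvScanA_not_found (pvTest name checked)
          (fun i => PySem.Int.mod (cur + i) n) l 0 0 hfr
        have hl2 := pvScanA_not_found (pvTest name checked)
          (fun i => PySem.Int.mod (cur - i) n) l 0 0 hfl
        simp [hr2, hl2]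
      | some m =>
        have hm_mem : m ∈ l := List.mem_of_find?_eq_some hfb
        have hRL : (R m || L m) = true := by simpa using List.find?_some hfb
        have min_b : ∀ x ∈ l, (R x || L x) = true → m ≤ x := pvFind?_min hpw hfb
        -- the right scan finds something
        have hfr : ∃ dr, l.find? R = some dr := by
          cases hfr0 : l.find? R with
          | some dr => exact ⟨dr, rfl⟩
          | none =>
            exfalso
            have hnoR := List.find?_eq_none.mp hfr0
            rcases Bool.or_eq_true_iff.mp hRL with hRm | hLm
            · exact hnoR m hm_mem hRm
            · obtain ⟨hmem', hR'⟩ := symLR m hm_mem hLm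
              exact hnoR _ hmem' hR'
        have hfl : ∃ dl, l.find? L = some dl := by
          cases hfl0 : l.find? L with
          | some dl => exact ⟨dl, rfl⟩
          | none =>
            exfalso
            have hnoL := List.find?_eq_none.mp hfl0
            rcases Bool.or_eq_true_iff.mp hRL with hRm | hLm
            · obtain ⟨hmem', hL'⟩ := symRL m hm_mem hRm
              exact hnoL _ hmem' hL'
            · exact hnoL m hm_mem hLm
        obtain ⟨dr, hdr⟩ := hfr
        obtain ⟨dl, hdl⟩ := hfl
        have hdr_mem : dr ∈ l := List.mem_of_find?_eq_some hdr
        have hdl_mem : dl ∈ l := List.mem_of_find?_eq_some hdl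
        have hRdr : R dr = true := List.find?_some hdr
        have hLdl : L dl = true := List.find?_some hdl
        have min_r : ∀ x ∈ l, R x = true → dr ≤ x := pvFind?_min hpw hdr
        have min_l : ∀ x ∈ l, L x = true → dl ≤ x := pvFind?_min hpw hdl
        have hm_le_dr : m ≤ dr := min_b dr hdr_mem (by simp [hRdr])
        have hm_le_dl : m ≤ dl := min_b dl hdl_mem (by simp [hLdl])
        have hA_r := pvScanA_found (pvTest name checked)
          (fun i => PySem.Int.mod (cur + i) n) l 0 0 dr hdr
        have hA_l := pvScanA_found (pvTest name checked)
          (fun i => PySem.Int.mod (cur - i) n) l 0 0 dl hdl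
        rw [pvScanB_found name checked cur n l m hfb]
        by_cases hRm : pvTest name checked (PySem.Int.mod (cur + m) n)
        · -- right candidate wins: m = dr ≤ dl
          have hdr_le : dr ≤ m := min_r m hm_mem (by rw [hR_def]; exact hRm)
          have : m = dr := le_antisymm hdr_le hm_le_dr |>.symm
          subst this
          simp [hA_r, hA_l, hRm]
          omega
        · -- left candidate wins: m = dl < dr
          have hLm : L m = true := by
            rcases Bool.or_eq_true_iff.mp hRL with h' | h'
            · exact absurd h' hRm
            · exact h'
          have hdl_le : dl ≤ m := min_l m hm_mem hLm
          have : m = dl := le_antisymm hdl_le hm_le_dl |>.symm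
          subst this
          have hlt : m < dr := by
            rcases lt_or_eq_of_le hm_le_dr with h' | h'
            · exact h'
            · exfalso; apply hRm; rw [← h'] at hRdr; exact hRdr
          simp [hA_r, hA_l, hRm]
          omega
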